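-- pv_equiv track=rewrite | github.com/mxfly14/phenoseeker | src/phenoseeker/embedding_manager.py | _well_to_row_col
-- ===== SOURCE A (Python) =====
-- def _well_to_row_col(well: str) -> tuple[int, int]:
--     row_part = "".join([ch for ch in well if ch.isalpha()])
--     col_part = "".join([ch for ch in well if ch.isdigit()])
--
--     row_index = 0
--     for char in row_part:
--         row_index = row_index * 26 + (ord(char.upper()) - ord("A") + 1)
--
--     col_index = int(col_part)
--
--     return row_index, col_index
-- ===== SOURCE B (Python) =====
-- def _well_to_row_col(well: str) -> tuple[int, int]:
--     # Positional expansion instead of Horner's rule: each letter, read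
--     # right-to-left, contributes its 1..26 value (case-folded by keeping the
--     # low five bits of its code) weighted by 26**position.
--     letters = [ch for ch in well if ch.isalpha()]
--     row_index = sum((ord(ch) & 31) * 26 ** i for i, ch in enumerate(reversed(letters)))
--     col_index = int("".join(ch for ch in well if ch.isdigit()))
--     return row_index, col_index
-- ===== Notes on version B (the rewrite author's own statement) =====
-- stated objective: alternative
-- what changed: Row value computed by positional expansion (sum of bitmask case-folded letter values weighted by powers of 26 over the reversed letter list) instead of A's Horner-rule accumulator over the upper-cased letters.
import Mathlib
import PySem

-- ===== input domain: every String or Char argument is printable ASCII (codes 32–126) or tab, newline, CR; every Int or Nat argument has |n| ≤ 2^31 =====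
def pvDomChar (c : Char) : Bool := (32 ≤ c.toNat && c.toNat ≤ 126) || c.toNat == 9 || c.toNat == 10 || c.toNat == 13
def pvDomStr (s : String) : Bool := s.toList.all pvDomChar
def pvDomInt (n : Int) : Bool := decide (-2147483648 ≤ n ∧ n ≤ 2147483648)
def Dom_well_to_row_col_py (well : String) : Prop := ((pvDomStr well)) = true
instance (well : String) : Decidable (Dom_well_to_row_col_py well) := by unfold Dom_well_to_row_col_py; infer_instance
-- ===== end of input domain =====

-- B replaces A's Horner-rule accumulation over the upper-cased letters by a positional
-- expansion (sum of bitmask-case-folded letter values times powers of 26 over the reversed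
-- letters); same O(n) cost, a different arithmetic scheme.


-- ===== PORT A =====
def well_to_row_col_py (well : String) : Int × Int :=
  let row_part : List Char := well.toList.filter (fun ch => PySem.Chars.isalpha ch)
  let col_part : List Char := well.toList.filter (fun ch => PySem.Chars.isdigit ch)
  let row_index : Int :=
    row_part.foldl (fun acc ch => acc * 26 + (((PySem.Chars.upperChar ch).toNat : Int) - 65 + 1)) 0
  let col_index : Int := (PySem.Int.ofChars? col_part).getD 0   -- int(col_part); none (ValueError) excluded by Pre_
  (row_index, col_index)

-- ===== PORT B =====
def well_to_row_col_py_alt (well : String) : Int × Int :=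
  let letters : List Char := well.toList.filter (fun ch => PySem.Chars.isalpha ch)
  let row_index : Int :=
    ((PySem.List.enumerate letters.reverse 0).map
      (fun p => ((p.2.toNat &&& 31 : Nat) : Int) * 26 ^ p.1.toNat)).sum
  let col_index : Int :=
    (PySem.Int.ofChars? (well.toList.filter (fun ch => PySem.Chars.isdigit ch))).getD 0
    -- int("".join(digits)); none (ValueError) excluded by Pre_
  (row_index, col_index)

-- ===== PRECONDITION & SPEC =====
-- When the string contains no ASCII digit, the digit part is empty and int() raises ValueError
-- in both programs; Pre_ keeps exactly the inputs on which A returns.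
def Pre_well_to_row_col_py (well : String) : Prop :=
  well.toList.any (fun ch => PySem.Chars.isdigit ch) = true
instance (well : String) : Decidable (Pre_well_to_row_col_py well) := by
  unfold Pre_well_to_row_col_py; infer_instance
def pvWitness_well_to_row_col_py : String := "B12"
def Spec_well_to_row_col_py (well : String) (out : Int × Int) : Prop := out = well_to_row_col_py_alt well
instance (well : String) (out : Int × Int) : Decidable (Spec_well_to_row_col_py well out) := by unfold Spec_well_to_row_col_py; infer_instance

-- ===== CLAIM =====
def Claim_equal_well_to_row_col_py : Prop := ∀ (well : String), Dom_well_to_row_col_py well → Pre_well_to_row_col_py well → Spec_well_to_row_col_py well (well_to_row_col_py well)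

-- ===== LEMMAS AND PROOFS =====

-- shifting the enumeration start by one multiplies the positional sum by 26
theorem possum_shift (f : Char → Int) (l : List Char) : ∀ (s : Int), 0 ≤ s →
    ((PySem.List.enumerate l (s + 1)).map (fun p => f p.2 * 26 ^ p.1.toNat)).sum
    = 26 * ((PySem.List.enumerate l s).map (fun p => f p.2 * 26 ^ p.1.toNat)).sum := by
  induction l with
  | nil => intro s _; simp [PySem.List.enumerate_nil]
  | cons c t ih =>
    intro s hs
    rw [PySem.List.enumerate_cons, PySem.List.enumerate_cons]
    simp only [List.map_cons, List.sum_cons]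
    rw [ih (s + 1) (by omega)]
    have h1 : (s + 1).toNat = s.toNat + 1 := by omega
    rw [h1, pow_succ]
    ring

-- Horner's rule equals the positional expansion over the reversed list
theorem horner_eq_possum (f : Char → Int) (l : List Char) :
    l.foldl (fun acc ch => acc * 26 + f ch) 0
    = ((PySem.List.enumerate l.reverse 0).map (fun p => f p.2 * 26 ^ p.1.toNat)).sum := by
  induction l using List.reverseRecOn with
  | nil => simp [PySem.List.enumerate_nil]
  | append_singleton t c ih =>
    rw [List.foldl_append, List.foldl_cons, List.foldl_nil, ih, List.reverse_append]
    simp only [List.reverse_singleton, List.singleton_append, PySem.List.enumerate_cons,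
      List.map_cons, List.sum_cons]
    rw [show (0:Int) + 1 = 0 + 1 by rfl, possum_shift f t.reverse 0 le_rfl]
    simp; ring

-- on an alphabetic ASCII character the low-five-bits mask equals upper() - 'A' + 1
theorem mask_eq_upper (c : Char) (h : PySem.Chars.isalpha c = true) :
    ((c.toNat &&& 31 : Nat) : Int) = ((PySem.Chars.upperChar c).toNat : Int) - 65 + 1 := by
  simp only [PySem.Chars.isalpha, PySem.Chars.isupper, PySem.Chars.islower, PySem.Chars.upperChar,
    Bool.or_eq_true, Bool.and_eq_true, decide_eq_true_eq] at h ⊢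
  have hand : c.toNat &&& 31 = c.toNat % 32 := Nat.and_two_pow_sub_one_eq_mod c.toNat 5
  rcases h with ⟨h1, h2⟩ | ⟨h1, h2⟩
  · have hA : 65 ≤ c.toNat := h1
    have hZ : c.toNat ≤ 90 := h2
    rw [if_neg (by rintro ⟨ha, _⟩; exact absurd (le_trans (ha : 'a' ≤ c) h2) (by decide))]
    omega
  · have ha : 97 ≤ c.toNat := h1
    have hz : c.toNat ≤ 122 := h2
    rw [if_pos ⟨h1, h2⟩]
    have hv : (Char.ofNat (c.toNat - 32)).toNat = c.toNat - 32 := by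
      rw [Char.toNat_ofNat, if_pos (Or.inl (by omega) : Nat.isValidChar (c.toNat - 32))]
    rw [hv]; omega

-- ===== VERDICT =====
theorem well_to_row_col_py_spec : Claim_equal_well_to_row_col_py := by
  intro well _ _
  unfold Spec_well_to_row_col_py well_to_row_col_py well_to_row_col_py_alt
  refine Prod.ext ?_ rfl
  show (well.toList.filter (fun ch => PySem.Chars.isalpha ch)).foldl
      (fun acc ch => acc * 26 + (((PySem.Chars.upperChar ch).toNat : Int) - 65 + 1)) 0 = _
  rw [horner_eq_possum (fun ch => ((PySem.Chars.upperChar ch).toNat : Int) - 65 + 1)]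
  refine congrArg List.sum (List.map_congr_left ?_).symm
  intro p hp
  rw [PySem.List.mem_enumerate_iff] at hp
  obtain ⟨k, hk, rfl⟩ := hp
  have hmem : (well.toList.filter (fun ch => PySem.Chars.isalpha ch)).reverse[k] ∈
      (well.toList.filter (fun ch => PySem.Chars.isalpha ch)).reverse := List.getElem_mem hk
  rw [List.mem_reverse, List.mem_filter] at hmem
  exact congrArg (· * 26 ^ ((0:Int) + k).toNat) (mask_eq_upper _ hmem.2)
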